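-- pv_equiv track=rewrite | github.com/MrBrantCode/unitest_baseline | mut_generate/mist_train_cf/cf_35941/solution.py | get_unique_sorted_strings
-- ===== SOURCE A (Python) =====
-- from typing import List
--
-- def get_unique_sorted_strings(input_list: List[str]) -> List[str]:
--     unique_strings = set()
--     for string in input_list:
--         if string.startswith(':'):
--             unique_strings.add(string[1:])  # Remove the leading colon and add to the set
--         else:
--             unique_strings.add(string)  # Add the string to the set as is
--     return sorted(list(unique_strings))  # Convert the set to a list, sort it, and return
-- ===== SOURCE B (Python) =====
-- def get_unique_sorted_strings(input_list):
--     normalized = [s[1:] if s.startswith(':') else s for s in input_list]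
--     normalized.sort()
--     result = []
--     for s in normalized:
--         if not result or result[-1] != s:
--             result.append(s)
--     return result
-- ===== Notes on version B (the rewrite author's own statement) =====
-- stated objective: alternative
-- what changed: Replaces hash-set deduplication followed by sorting with normalize-then-sort and a single linear pass removing adjacent duplicates (no set is maintained).
import Mathlib
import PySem

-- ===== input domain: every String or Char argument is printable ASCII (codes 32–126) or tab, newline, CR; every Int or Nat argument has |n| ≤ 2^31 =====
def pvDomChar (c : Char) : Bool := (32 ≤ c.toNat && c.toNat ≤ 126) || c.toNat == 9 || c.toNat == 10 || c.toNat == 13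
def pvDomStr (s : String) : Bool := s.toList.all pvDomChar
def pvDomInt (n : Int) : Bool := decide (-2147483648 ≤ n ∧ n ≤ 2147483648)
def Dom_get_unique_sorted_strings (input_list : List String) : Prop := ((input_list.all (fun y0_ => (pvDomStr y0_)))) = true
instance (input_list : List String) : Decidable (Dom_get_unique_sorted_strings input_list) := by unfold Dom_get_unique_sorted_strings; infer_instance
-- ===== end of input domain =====

-- B replaces A's hash-set deduplication by normalize-then-sort with a linear adjacent-duplicate pass (alternative decomposition, same cost).

-- ===== PORT A =====
def get_unique_sorted_strings (input_list : List String) : List String :=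
  let unique_strings : PySem.Set String :=
    input_list.foldl (fun st s =>
      if PySem.Str.startswith s ":" then
        PySem.Set.add st (PySem.Str.slice s (some 1) none)
      else
        PySem.Set.add st s) PySem.Set.empty
  PySem.List.sorted unique_strings (fun x => x) false

-- ===== PORT B =====
-- the adjacent-duplicate step of Source B's loop: append s unless result is nonempty with result[-1] == s
def pvUniqStep (result : List String) (s : String) : List String :=
  match result.getLast? with
  | none => result ++ [s]
  | some y => if y ≠ s then result ++ [s] else result

def get_unique_sorted_strings_alt (input_list : List String) : List String :=
  let normalized := input_list.map (fun s =>
    if PySem.Str.startswith s ":" then PySem.Str.slice s (some 1) none else s)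
  let sortedL := PySem.List.sorted normalized (fun x => x) false
  sortedL.foldl pvUniqStep []

-- ===== PRECONDITION & SPEC =====
def Spec_get_unique_sorted_strings (input_list : List String) (out : List String) : Prop := out = get_unique_sorted_strings_alt input_list
instance (input_list : List String) (out : List String) : Decidable (Spec_get_unique_sorted_strings input_list out) := by unfold Spec_get_unique_sorted_strings; infer_instance

-- ===== CLAIM (what is proved, stated in full; the proofs are below) =====
def Claim_equal_get_unique_sorted_strings : Prop := ∀ (input_list : List String), Dom_get_unique_sorted_strings input_list → Spec_get_unique_sorted_strings input_list (get_unique_sorted_strings input_list)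

-- ===== LEMMAS AND PROOFS =====

theorem pvMem_foldl_uniqStep (l : List String) (acc : List String) (x : String) :
    x ∈ l.foldl pvUniqStep acc ↔ x ∈ acc ∨ x ∈ l := by
  induction l generalizing acc with
  | nil => simp
  | cons y l ih =>
    simp only [List.foldl_cons, ih, pvUniqStep]
    cases h : acc.getLast? with
    | none => dsimp only; simp; tauto
    | some z =>
      dsimp only
      by_cases hz : z ≠ y
      · rw [if_pos hz]; simp; tauto
      · rw [if_neg hz]
        have hzy : z = y := not_not.mp hz
        subst hzy
        have hmem : z ∈ acc := List.mem_of_getLast? h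
        constructor
        · tauto
        · rintro (h1 | h1)
          · exact Or.inl h1
          · rcases List.mem_cons.mp h1 with rfl | h1
            · exact Or.inl hmem
            · exact Or.inr h1

theorem pvLe_last {acc : List String} {a : String}
    (hp : acc.Pairwise (· < ·)) (h : acc.getLast? = some a) :
    ∀ c ∈ acc, c ≤ a := by
  induction acc with
  | nil => simp at h
  | cons b t ih =>
    cases t with
    | nil =>
      simp at h
      subst h
      intro c hc
      simp at hc
      exact hc.le
    | cons d t' =>
      have h' : (d :: t').getLast? = some a := by
        rwa [List.getLast?_cons_cons] at h
      intro c hc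
      rcases List.mem_cons.mp hc with rfl | hc'
      · have ha : a ∈ d :: t' := List.mem_of_getLast? h'
        exact ((List.pairwise_cons.mp hp).1 a ha).le
      · exact ih (List.pairwise_cons.mp hp).2 h' c hc'

theorem pvPairwise_foldl_uniqStep (l : List String) (acc : List String)
    (hl : l.Pairwise (· ≤ ·)) (hacc : acc.Pairwise (· < ·))
    (hlast : ∀ a, acc.getLast? = some a → ∀ b ∈ l, a ≤ b) :
    (l.foldl pvUniqStep acc).Pairwise (· < ·) := by
  induction l generalizing acc with
  | nil => exact hacc
  | cons y l ih =>
    have h1 : ∀ b ∈ l, y ≤ b := (List.pairwise_cons.mp hl).1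
    have h2 : l.Pairwise (· ≤ ·) := (List.pairwise_cons.mp hl).2
    simp only [List.foldl_cons, pvUniqStep]
    cases h : acc.getLast? with
    | none =>
      dsimp only
      have hnil : acc = [] := List.getLast?_eq_none_iff.mp h
      subst hnil
      refine ih [y] h2 (by simp) ?_
      intro a ha b hb
      simp at ha; subst ha; exact h1 b hb
    | some z =>
      dsimp only
      have hz_le_y : z ≤ y := hlast z h y (List.mem_cons_self ..)
      by_cases hzy : z ≠ y
      · rw [if_pos hzy]
        have hzy' : z < y := lt_of_le_of_ne hz_le_y hzy
        refine ih (acc ++ [y]) h2 ?_ ?_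
        · rw [List.pairwise_append]
          refine ⟨hacc, by simp, ?_⟩
          intro c hc d hd
          simp at hd; subst hd
          exact lt_of_le_of_lt (pvLe_last hacc h c hc) hzy'
        · intro a ha b hb
          rw [List.getLast?_append] at ha
          simp at ha; subst ha
          exact h1 b hb
      · rw [if_neg hzy]
        refine ih acc h2 hacc ?_
        intro a ha b hb
        rw [h] at ha
        cases ha
        exact (hlast z h b (List.mem_cons_of_mem _ hb))

-- ===== VERDICT (by name: the statement is the Claim_ definition above) =====
theorem get_unique_sorted_strings_spec : Claim_equal_get_unique_sorted_strings := by
  intro input_list _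
  unfold Spec_get_unique_sorted_strings get_unique_sorted_strings get_unique_sorted_strings_alt
  simp only []
  set f : String → String := fun s =>
    if PySem.Str.startswith s ":" then PySem.Str.slice s (some 1) none else s with hf
  set M : List String := input_list.map f with hM
  -- A's loop builds set(map f input_list)
  have hA : input_list.foldl (fun st s =>
      if PySem.Str.startswith s ":" then
        PySem.Set.add st (PySem.Str.slice s (some 1) none)
      else PySem.Set.add st s) PySem.Set.empty = PySem.Set.ofList M := by
    have hfun : (fun (st : PySem.Set String) s =>
        if PySem.Str.startswith s ":" then
          PySem.Set.add st (PySem.Str.slice s (some 1) none)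
        else PySem.Set.add st s) = (fun st s => PySem.Set.add st (f s)) := by
      funext st s
      simp only [hf]
      split <;> simp_all
    rw [hfun, hM, ← PySem.Set.update_map_eq_foldl_add, PySem.Set.update_empty]
  rw [hA]
  set S := PySem.List.sorted M (fun x => x) false with hS
  have hSp : S.Pairwise (· ≤ ·) := PySem.List.sorted_pairwise M (fun x => x)
  set R := S.foldl pvUniqStep [] with hR
  have hRpw : R.Pairwise (· < ·) := pvPairwise_foldl_uniqStep S [] hSp (by simp) (by simp)
  have hperm : R.Perm (PySem.Set.ofList M) := by
    rw [List.perm_ext_iff_of_nodup (hRpw.imp ne_of_lt) (PySem.Set.nodup_ofList M)]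
    intro x
    rw [hR, pvMem_foldl_uniqStep, hS, PySem.List.mem_sorted, PySem.Set.mem_ofList]
    simp
  exact PySem.List.sorted_eq_of_perm_of_pairwise_lt _ _ _ hperm hRpw
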